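-- pv_equiv track=rewrite | github.com/zszzlmt/leetcode | 728.py | __check__
-- ===== SOURCE A (Python) =====
-- def __check__(n):
--     digits = list()
--     tmp = n
--     while tmp != 0:
--         digits.append(tmp % 10)
--         tmp = tmp // 10
--         if digits[-1] == 0:
--             return False
--     for digit in digits:
--         if n % digit != 0:
--             return False
--     return True
-- ===== SOURCE B (Python) =====
-- def __check__(n):
--     tmp = n
--     while tmp != 0:
--         d = tmp % 10
--         if d == 0 or n % d != 0:
--             return False
--         tmp //= 10
--     return True
-- ===== Notes on version B (the rewrite author's own statement) =====
-- stated objective: simpler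
-- what changed: B fuses A's two passes (build a digit list, then scan it for divisibility) into one loop that tests each digit immediately and keeps no list; negative n (where A can diverge) is excluded, and on excluded negatives where A returns, both return False.
-- outside the precondition, e.g. on __check__(-10): A returns False, B returns False; on __check__(-13): A does not finish within the time limit, B returns False
import Mathlib
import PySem

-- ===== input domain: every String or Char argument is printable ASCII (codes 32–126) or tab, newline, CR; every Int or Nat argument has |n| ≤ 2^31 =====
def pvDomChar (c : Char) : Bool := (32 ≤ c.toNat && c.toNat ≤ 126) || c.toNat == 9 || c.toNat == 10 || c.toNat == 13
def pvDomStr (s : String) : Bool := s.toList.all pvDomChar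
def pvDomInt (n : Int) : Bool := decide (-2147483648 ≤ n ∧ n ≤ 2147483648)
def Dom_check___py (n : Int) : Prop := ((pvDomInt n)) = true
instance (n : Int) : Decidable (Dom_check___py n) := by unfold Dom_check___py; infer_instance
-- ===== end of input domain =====

-- B fuses A's list-building pass and divisibility scan into a single listless loop; Pre_ excludes negative n, where A mostly diverges.
-- ===== PORT A =====
-- A's while loop, with fuel that suffices for every n ≥ 0 (fuel only makes the same computation total)
def pvALoop : Nat → Int → List Int → Option (List Int)
  | 0, _, digits => some digits
  | fuel+1, tmp, digits =>
    if tmp = 0 then some digits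
    else
      let d := PySem.Int.mod tmp 10
      let digits' := digits ++ [d]
      if d = 0 then none
      else pvALoop fuel (PySem.Int.floordiv tmp 10) digits'

def check___py (n : Int) : Bool :=
  match pvALoop (n.toNat + 1) n [] with
  | none => false
  | some digits => digits.all (fun d => PySem.Int.mod n d == 0)

-- ===== PORT B =====
def pvBLoop (n : Int) : Nat → Int → Bool
  | 0, _ => true
  | fuel+1, tmp =>
    if tmp = 0 then true
    else
      let d := PySem.Int.mod tmp 10
      if d = 0 || PySem.Int.mod n d != 0 then false
      else pvBLoop n fuel (PySem.Int.floordiv tmp 10)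

def check___py_alt (n : Int) : Bool := pvBLoop n (n.toNat + 1) n

-- ===== PRECONDITION & SPEC =====
-- Pre_ excludes negative n: there A's while loop does not terminate unless it meets a zero digit (tmp stalls at -1 under floor division); on the negatives where A does return, both programs return False.
def Pre_check___py (n : Int) : Prop := 0 ≤ n
instance (n : Int) : Decidable (Pre_check___py n) := by unfold Pre_check___py; infer_instance
def pvWitness_check___py : Int := (128)
def Spec_check___py (n : Int) (out : Bool) : Prop := out = check___py_alt n
instance (n : Int) (out : Bool) : Decidable (Spec_check___py n out) := by unfold Spec_check___py; infer_instance

-- ===== CLAIM (what is proved, stated in full; the proofs are below) =====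
def Claim_equal_check___py : Prop := ∀ (n : Int), Dom_check___py n → Pre_check___py n → Spec_check___py n (check___py n)

-- ===== LEMMAS AND PROOFS =====
theorem pv_main (n : Int) : ∀ (fuel : Nat) (tmp : Int) (digits : List Int),
    0 ≤ tmp → tmp.toNat < fuel →
    (match pvALoop fuel tmp digits with
     | none => false
     | some ds => ds.all (fun d => PySem.Int.mod n d == 0))
      = (digits.all (fun d => PySem.Int.mod n d == 0) && pvBLoop n fuel tmp) := by
  intro fuel
  induction fuel with
  | zero => intro tmp digits _ h; omega
  | succ f ih =>
    intro tmp digits htmp hfuel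
    by_cases h0 : tmp = 0
    · simp [pvALoop, pvBLoop, h0]
    · have hpos : 0 < tmp := lt_of_le_of_ne htmp (Ne.symm h0)
      have hmod : PySem.Int.mod tmp 10 = tmp % 10 := PySem.Int.mod_eq_emod_of_pos (by norm_num)
      have hdiv : PySem.Int.floordiv tmp 10 = tmp / 10 := PySem.Int.floordiv_eq_ediv_of_pos (by norm_num)
      have hdivnn : 0 ≤ PySem.Int.floordiv tmp 10 := by rw [hdiv]; positivity
      have hdec : (PySem.Int.floordiv tmp 10).toNat < f := by
        rw [hdiv]; omega
      have hiff : PySem.Int.mod tmp 10 = 0 ↔ (10 : Int) ∣ tmp := by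
        rw [hmod, Int.dvd_iff_emod_eq_zero]
      by_cases hd : PySem.Int.mod tmp 10 = 0
      · have hdvd : (10 : Int) ∣ tmp := hiff.mp hd
        simp [pvALoop, pvBLoop, h0, hd, hdvd, hmod]
      · have hdvd : ¬ (10 : Int) ∣ tmp := fun h => hd (hiff.mpr h)
        rw [show pvALoop (f+1) tmp digits
              = pvALoop f (PySem.Int.floordiv tmp 10) (digits ++ [PySem.Int.mod tmp 10]) by
            simp [pvALoop, h0, hd, hmod, hdvd]]
        rw [ih _ _ hdivnn hdec]
        by_cases hp : PySem.Int.mod n (PySem.Int.mod tmp 10) = 0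
        · simp [pvBLoop, h0, hd, hp, hdvd, hmod, Bool.and_assoc]; rfl
        · simp [pvBLoop, h0, hd, hp, hdvd, hmod, Bool.and_assoc]; rfl

-- ===== VERDICT (by name: the statement is the Claim_ definition above) =====
theorem check___py_spec : Claim_equal_check___py := by
  intro n _ hpre
  unfold Spec_check___py check___py check___py_alt
  rw [pv_main n (n.toNat + 1) n [] hpre (by omega)]
  simp
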